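-- pv_equiv track=rewrite | github.com/Subburam1/Agile | ocr_project/ocr/deep_learning_ocr.py | _detect_document_structure
-- ===== SOURCE A (Python) =====
-- from typing import List, Dict, Tuple, Optional, Any
--
-- def _detect_document_structure(blocks: List[Dict]) -> str:
--     """Detect document structure type."""
--     if len(blocks) == 0:
--         return 'empty'
--     elif len(blocks) <= 3:
--         return 'simple'
--     elif any('invoice' in block['text'].lower() or 'bill' in block['text'].lower() for block in blocks):
--         return 'invoice'
--     elif any('receipt' in block['text'].lower() or 'total' in block['text'].lower() for block in blocks):
--         return 'receipt'
--     else: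
--         return 'document'
-- ===== SOURCE B (Python) =====
-- def _detect_document_structure(blocks):
--     """Detect document structure type (single pass with early exit on invoice)."""
--     if len(blocks) == 0:
--         return 'empty'
--     if len(blocks) <= 3:
--         return 'simple'
--     has_receipt = False
--     for block in blocks:
--         t = block['text'].lower()
--         if 'invoice' in t or 'bill' in t:
--             return 'invoice'
--         if 'receipt' in t or 'total' in t:
--             has_receipt = True
--     return 'receipt' if has_receipt else 'document'
-- ===== Notes on version B (the rewrite author's own statement) =====
-- stated objective: alternative
-- what changed: Replaces A's two separate any()-scans over blocks (each lowering every text twice) with one loop that lowers each text once, returns 'invoice' immediately on a match and carries a has_receipt flag to decide 'receipt' vs 'document' after the loop.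
import Mathlib
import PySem

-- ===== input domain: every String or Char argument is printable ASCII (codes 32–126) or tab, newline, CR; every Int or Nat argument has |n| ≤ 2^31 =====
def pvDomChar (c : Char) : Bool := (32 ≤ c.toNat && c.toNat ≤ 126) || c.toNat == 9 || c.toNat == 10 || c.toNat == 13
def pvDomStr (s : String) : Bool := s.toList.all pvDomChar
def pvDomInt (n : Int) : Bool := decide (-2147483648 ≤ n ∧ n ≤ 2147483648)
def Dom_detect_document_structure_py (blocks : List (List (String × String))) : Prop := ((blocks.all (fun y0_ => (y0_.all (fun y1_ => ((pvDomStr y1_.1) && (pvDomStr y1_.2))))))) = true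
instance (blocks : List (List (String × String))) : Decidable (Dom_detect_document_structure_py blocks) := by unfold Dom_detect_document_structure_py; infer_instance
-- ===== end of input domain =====

-- B replaces A's two any()-scans with one loop that returns 'invoice' early and carries a has_receipt flag (alternative decomposition, same cost).


-- ===== PORT A =====
-- block['text'] is a KeyError when absent; the port totalises with getD "" and Pre_ excludes exactly the raising inputs
def pvIsInvoice (block : List (String × String)) : Bool :=
  PySem.Str.isIn "invoice" (PySem.Str.lower ((PySem.Dict.mk block).getD "text" "")) ||
  PySem.Str.isIn "bill" (PySem.Str.lower ((PySem.Dict.mk block).getD "text" ""))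

def pvIsReceipt (block : List (String × String)) : Bool :=
  PySem.Str.isIn "receipt" (PySem.Str.lower ((PySem.Dict.mk block).getD "text" "")) ||
  PySem.Str.isIn "total" (PySem.Str.lower ((PySem.Dict.mk block).getD "text" ""))

def detect_document_structure_py (blocks : List (List (String × String))) : String :=
  if blocks.length = 0 then "empty"
  else if blocks.length ≤ 3 then "simple"
  else if blocks.any pvIsInvoice then "invoice"
  else if blocks.any pvIsReceipt then "receipt"
  else "document"

-- ===== PORT B =====
-- one pass: lower each text once, early return on invoice, has_receipt flag otherwise
def pvAltLoop : List (List (String × String)) → Bool → String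
  | [], hasReceipt => if hasReceipt then "receipt" else "document"
  | block :: rest, hasReceipt =>
      let t := PySem.Str.lower ((PySem.Dict.mk block).getD "text" "")
      if PySem.Str.isIn "invoice" t || PySem.Str.isIn "bill" t then "invoice"
      else pvAltLoop rest (hasReceipt || (PySem.Str.isIn "receipt" t || PySem.Str.isIn "total" t))

def detect_document_structure_py_alt (blocks : List (List (String × String))) : String :=
  if blocks.length = 0 then "empty"
  else if blocks.length ≤ 3 then "simple"
  else pvAltLoop blocks false

-- ===== PRECONDITION & SPEC =====
-- Pre_ excludes exactly the inputs where Python A raises KeyError: more than 3 blocks, and a block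
-- without a 'text' key is reached before any invoice/bill match during the scan.
def Pre_detect_document_structure_py (blocks : List (List (String × String))) : Prop :=
  blocks.length ≤ 3 ∨
  (blocks.takeWhile (fun b => ((PySem.Dict.mk b).get? "text").isSome)).length = blocks.length ∨
  ((blocks.takeWhile (fun b => ((PySem.Dict.mk b).get? "text").isSome)).any
      (fun b =>
        PySem.Str.isIn "invoice" (PySem.Str.lower ((PySem.Dict.mk b).getD "text" "")) ||
        PySem.Str.isIn "bill" (PySem.Str.lower ((PySem.Dict.mk b).getD "text" "")))) = true
instance (blocks : List (List (String × String))) : Decidable (Pre_detect_document_structure_py blocks) := by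
  unfold Pre_detect_document_structure_py; infer_instance

def pvWitness_detect_document_structure_py : (List (List (String × String))) :=
  [[("text", "hello")], [("text", "Total due")], [("text", "world")], [("text", "x")]]

def Spec_detect_document_structure_py (blocks : List (List (String × String))) (out : String) : Prop := out = detect_document_structure_py_alt blocks
instance (blocks : List (List (String × String))) (out : String) : Decidable (Spec_detect_document_structure_py blocks out) := by unfold Spec_detect_document_structure_py; infer_instance

-- ===== CLAIM (what is proved, stated in full; the proofs are below) =====
def Claim_equal_detect_document_structure_py : Prop := ∀ (blocks : List (List (String × String))), Dom_detect_document_structure_py blocks → Pre_detect_document_structure_py blocks → Spec_detect_document_structure_py blocks (detect_document_structure_py blocks)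

-- ===== LEMMAS AND PROOFS =====
-- B's loop, on any start flag, computes A's two-scan answer
theorem pvAltLoop_eq (blocks : List (List (String × String))) (flag : Bool) :
    pvAltLoop blocks flag =
      (if blocks.any pvIsInvoice then "invoice"
       else if (flag || blocks.any pvIsReceipt) then "receipt" else "document") := by
  induction blocks generalizing flag with
  | nil => simp [pvAltLoop]
  | cons b rest ih =>
      simp only [pvAltLoop, List.any_cons]
      rw [show (PySem.Str.isIn "invoice" (PySem.Str.lower ((PySem.Dict.mk b).getD "text" "")) ||
            PySem.Str.isIn "bill" (PySem.Str.lower ((PySem.Dict.mk b).getD "text" ""))) = pvIsInvoice b from rfl,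
          show (PySem.Str.isIn "receipt" (PySem.Str.lower ((PySem.Dict.mk b).getD "text" "")) ||
            PySem.Str.isIn "total" (PySem.Str.lower ((PySem.Dict.mk b).getD "text" ""))) = pvIsReceipt b from rfl,
          ih]
      cases hi : pvIsInvoice b <;> simp [Bool.or_assoc]

-- ===== VERDICT (by name: the statement is the Claim_ definition above) =====
theorem detect_document_structure_py_spec : Claim_equal_detect_document_structure_py := by
  intro blocks _ _
  unfold Spec_detect_document_structure_py detect_document_structure_py detect_document_structure_py_alt
  by_cases h0 : blocks.length = 0
  · simp [h0]
  · by_cases h3 : blocks.length ≤ 3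
    · simp [h0, h3]
    · rw [if_neg h0, if_neg h3, if_neg h0, if_neg h3, pvAltLoop_eq]
      simp
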